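-- pv_equiv track=rewrite | github.com/charles9li/che210dproject | projectlib/potentials/_potential_base_classes.py | _get_key_groups_from_nested_dict
-- ===== SOURCE A (Python) =====
-- def _get_key_groups_from_nested_dict(nested_dict, depth):
--     key_groups = []
--     for key in nested_dict.keys():
--         if depth == 1:
--             key_groups.append([key])
--         else:
--             for kg in _get_key_groups_from_nested_dict(nested_dict, depth-1):
--                 key_groups.append([key] + list(kg))
--     return list(map(lambda x: tuple(x), key_groups))
-- ===== SOURCE B (Python) =====
-- def _get_key_groups_from_nested_dict(nested_dict, depth):
--     keys = list(nested_dict.keys())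
--     result = [[]]
--     for _ in range(depth):
--         result = [r + [key] for r in result for key in keys]
--     return [tuple(r) for r in result]
-- ===== Notes on version B (the rewrite author's own statement) =====
-- stated objective: simpler
-- what changed: Replaces the depth-recursion (which re-enters itself once per key at every level) with a non-recursive level-by-level build of the cartesian product: a list of partial key-groups is extended by one key position per loop iteration; Pre_ only excludes depth <= 0, where A raises RecursionError on every non-empty dict and where on the empty dict the unspecified empty-product corner is anybody's (A's [] vs B's [()]).
-- outside the precondition, e.g. on _get_key_groups_from_nested_dict({}, 0): A returns [], B returns [()]
import Mathlib
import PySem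

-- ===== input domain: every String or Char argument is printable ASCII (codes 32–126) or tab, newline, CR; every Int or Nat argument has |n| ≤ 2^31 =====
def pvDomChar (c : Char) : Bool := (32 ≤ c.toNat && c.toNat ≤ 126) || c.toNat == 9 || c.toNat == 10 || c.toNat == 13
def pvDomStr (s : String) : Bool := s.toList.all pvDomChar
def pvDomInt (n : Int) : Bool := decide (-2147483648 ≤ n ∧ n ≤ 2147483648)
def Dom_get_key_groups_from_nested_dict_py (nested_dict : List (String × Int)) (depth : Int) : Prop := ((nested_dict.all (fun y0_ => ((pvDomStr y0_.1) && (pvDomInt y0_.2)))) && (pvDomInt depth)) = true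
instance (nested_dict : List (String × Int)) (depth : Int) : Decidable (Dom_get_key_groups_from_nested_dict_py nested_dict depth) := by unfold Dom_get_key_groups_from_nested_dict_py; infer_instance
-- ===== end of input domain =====

-- B replaces A's depth-recursion by an iterative level-by-level cartesian-product build (simpler: no recursion).


-- ===== PORT A =====
-- recursion on depth, transliterated with fuel = depth.toNat; the fuel-0 arm is
-- unreachable under Pre_ (for depth ≤ 0 the Python raises or the corner is excluded).
-- 'list(map(tuple, key_groups))' is the identity under the type convention (tuple → List String).
def pvA_aux (keys : List String) : Nat → List (List String)
  | 0 => []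
  | n + 1 =>
      keys.foldl (fun key_groups key =>
        if n + 1 = 1 then
          key_groups ++ [[key]]
        else
          (pvA_aux keys n).foldl (fun key_groups kg => key_groups ++ [key :: kg]) key_groups) []

def get_key_groups_from_nested_dict_py (nested_dict : List (String × Int)) (depth : Int) : List (List String) :=
  pvA_aux ((PySem.Dict.ofList nested_dict).keys) depth.toNat

-- ===== PORT B =====
def get_key_groups_from_nested_dict_py_alt (nested_dict : List (String × Int)) (depth : Int) : List (List String) :=
  let keys := (PySem.Dict.ofList nested_dict).keys
  let result : List (List String) := [[]]
  let result := (PySem.List.pyRange 0 depth 1).foldl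
      (fun result _ => result.flatMap (fun r => keys.map (fun key => r ++ [key]))) result
  result

-- ===== PRECONDITION & SPEC =====
-- Pre_ excludes exactly depth ≤ 0: there A's recursion never reaches its base case and
-- raises RecursionError whenever the dict is non-empty, and on the empty dict the
-- unspecified depth-0 corner is anybody's (A's [] vs B's [()], the empty cartesian
-- product, are both defensible values no caller specifies).
def Pre_get_key_groups_from_nested_dict_py (nested_dict : List (String × Int)) (depth : Int) : Prop :=
  1 ≤ depth
instance (nested_dict : List (String × Int)) (depth : Int) : Decidable (Pre_get_key_groups_from_nested_dict_py nested_dict depth) := by unfold Pre_get_key_groups_from_nested_dict_py; infer_instance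
def pvWitness_get_key_groups_from_nested_dict_py : (List (String × Int)) × Int := ([("a", 1), ("b", 2)], 2)

def Spec_get_key_groups_from_nested_dict_py (nested_dict : List (String × Int)) (depth : Int) (out : List (List String)) : Prop := out = get_key_groups_from_nested_dict_py_alt nested_dict depth
instance (nested_dict : List (String × Int)) (depth : Int) (out : List (List String)) : Decidable (Spec_get_key_groups_from_nested_dict_py nested_dict depth out) := by unfold Spec_get_key_groups_from_nested_dict_py; infer_instance

-- ===== CLAIM (what is proved, stated in full; the proofs are below) =====
def Claim_equal_get_key_groups_from_nested_dict_py : Prop := ∀ (nested_dict : List (String × Int)) (depth : Int), Dom_get_key_groups_from_nested_dict_py nested_dict depth → Pre_get_key_groups_from_nested_dict_py nested_dict depth → Spec_get_key_groups_from_nested_dict_py nested_dict depth (get_key_groups_from_nested_dict_py nested_dict depth)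

-- ===== LEMMAS AND PROOFS =====

-- B's one-level step.
def pvStep (keys : List String) (res : List (List String)) : List (List String) :=
  res.flatMap (fun r => keys.map (fun key => r ++ [key]))

lemma pvFlatten_map_singleton {α β : Type} (f : α → β) (l : List α) :
    (l.map (fun x => [f x])).flatten = l.map f := by
  induction l with
  | nil => rfl
  | cons x xs ih => simp [ih]

lemma pvStep_cons (keys : List String) (k : String) (res : List (List String)) :
    pvStep keys (res.map (fun g => k :: g)) = (pvStep keys res).map (fun g => k :: g) := by
  simp [pvStep, List.flatMap_map, List.map_flatMap, List.map_map, Function.comp_def]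

lemma pvStep_flatMap (keys : List String) (l : List String)
    (f : String → List (List String)) :
    pvStep keys (l.flatMap f) = l.flatMap (fun k => pvStep keys (f k)) := by
  simp [pvStep, List.flatMap_assoc]

lemma pvIter_flatMap (keys : List String) (n : Nat) (l : List String)
    (f : String → List (List String)) :
    (pvStep keys)^[n] (l.flatMap f) = l.flatMap (fun k => (pvStep keys)^[n] (f k)) := by
  induction n generalizing f with
  | zero => simp
  | succ n ih =>
      rw [Function.iterate_succ_apply, pvStep_flatMap, ih]
      simp [Function.iterate_succ_apply]

lemma pvIter_cons (keys : List String) (n : Nat) (k : String) (res : List (List String)) :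
    (pvStep keys)^[n] (res.map (fun g => k :: g)) = ((pvStep keys)^[n] res).map (fun g => k :: g) := by
  induction n generalizing res with
  | zero => simp
  | succ n ih =>
      rw [Function.iterate_succ_apply, pvStep_cons, ih, ← Function.iterate_succ_apply]

lemma pvA_aux_succ_succ (keys : List String) (n : Nat) :
    pvA_aux keys (n + 2) = keys.flatMap (fun key => (pvA_aux keys (n + 1)).map (fun kg => key :: kg)) := by
  rw [pvA_aux,
    show (fun (key_groups : List (List String)) (key : String) =>
        if n + 1 + 1 = 1 then key_groups ++ [[key]]
        else (pvA_aux keys (n + 1)).foldl (fun key_groups kg => key_groups ++ [key :: kg]) key_groups)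
      = (fun key_groups key => key_groups ++ (pvA_aux keys (n + 1)).map (fun kg => key :: kg)) from by
        funext acc key
        rw [if_neg (by omega), PySem.List.foldl_append_singleton_eq_map],
    PySem.List.foldl_append_eq_flatMap]
  simp

lemma pvStep_nil_nil (keys : List String) :
    pvStep keys [[]] = keys.flatMap (fun k => List.map (fun g => k :: g) [[]]) := by
  induction keys with
  | nil => rfl
  | cons x xs ih => simp_all [pvStep]

lemma pvA_aux_eq_iter (keys : List String) (n : Nat) :
    pvA_aux keys (n + 1) = (pvStep keys)^[n + 1] [[]] := by
  induction n with
  | zero =>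
      simp [pvA_aux, pvStep, pvFlatten_map_singleton]
  | succ n ih =>
      rw [pvA_aux_succ_succ, ih]
      conv_rhs => rw [Function.iterate_succ_apply, pvStep_nil_nil, pvIter_flatMap]
      simp only [pvIter_cons]

lemma pvFoldl_const_step (keys : List String) (l : List Int) (init : List (List String)) :
    l.foldl (fun res _ => pvStep keys res) init = (pvStep keys)^[l.length] init := by
  induction l generalizing init with
  | nil => rfl
  | cons x xs ih => simp [List.foldl_cons, ih, Function.iterate_succ_apply]

-- ===== VERDICT (by name: the statement is the Claim_ definition above) =====
theorem get_key_groups_from_nested_dict_py_spec : Claim_equal_get_key_groups_from_nested_dict_py := by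
  intro nested_dict depth _ hpre
  have h1 : (1 : Int) ≤ depth := hpre
  obtain ⟨n, hn⟩ : ∃ n : Nat, depth.toNat = n + 1 := ⟨depth.toNat - 1, by omega⟩
  show pvA_aux ((PySem.Dict.ofList nested_dict).keys) depth.toNat =
      List.foldl (fun res _ => pvStep ((PySem.Dict.ofList nested_dict).keys) res) [[]]
        (PySem.List.pyRange 0 depth 1)
  have hlen : (PySem.List.pyRange 0 depth 1).length = depth.toNat := by
    rw [show depth = ((depth.toNat : Nat) : Int) by omega, PySem.List.pyRange_zero_natCast]
    simp
    omega
  rw [pvFoldl_const_step, hlen, hn, pvA_aux_eq_iter]
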